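-- pv_equiv track=rewrite | github.com/AlexGP80/Java | Equations/eq.py | get_next_var_name
-- ===== SOURCE A (Python) =====
-- def get_next_char(c):
--     ascii = ord(c) + 1
--     if ascii > 122:
--         ascii = 97
--     return chr(ascii)
--
-- def get_next_var_name(var_name):
--     if var_name == 'w':
--         return 'y'
--
--     next_var = var_name
--
--     if next_var[-1] == 'z':
--         count = 0
--         for c in reversed(next_var):
--             if c == 'z':
--                 count += 1
--             else:
--                 break
--         if count == len(next_var):
--             next_var = next_var.replace('z','a') + 'a'
--         else:
--             next_var = next_var[:-count-1] + get_next_char(next_var[-count-1])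
--             for i in range(count):
--                 next_var += 'a'
--         # next_var += 'a'
--     else:
--         next_var = f"{next_var[:-1]}{chr(ord(next_var[-1])+1)}"
--
--     return next_var
-- ===== SOURCE B (Python) =====
-- # B: structural right-to-left carry recursion instead of A's count-the-z-run-then-slice pass.
-- def _wrap_succ(c):
--     n = ord(c) + 1
--     return chr(97 if n > 122 else n)
--
-- def _carry_rev(rchars):
--     # rchars = the name reversed; increment with carry; None = overflow (all 'z')
--     if not rchars:
--         return None
--     if rchars[0] == 'z':
--         rest = _carry_rev(rchars[1:])
--         return None if rest is None else ['a'] + rest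
--     return [_wrap_succ(rchars[0])] + rchars[1:]
--
-- def get_next_var_name(var_name):
--     if var_name == 'w':
--         return 'y'
--     chars = list(var_name)
--     if chars[-1] != 'z':
--         return ''.join(chars[:-1]) + chr(ord(chars[-1]) + 1)
--     res = _carry_rev(chars[::-1])
--     if res is None:
--         return 'a' * (len(chars) + 1)
--     return ''.join(reversed(res))
-- ===== Notes on version B (the rewrite author's own statement) =====
-- stated objective: alternative
-- what changed: A counts the trailing 'z'-run in a separate reversed scan and then rebuilds the name with slicing, str.replace and an append loop; B does one structural right-to-left carry recursion that turns trailing 'z's into 'a's and bumps the first non-'z' character, with overflow (all 'z') signalled by None.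
import Mathlib
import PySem

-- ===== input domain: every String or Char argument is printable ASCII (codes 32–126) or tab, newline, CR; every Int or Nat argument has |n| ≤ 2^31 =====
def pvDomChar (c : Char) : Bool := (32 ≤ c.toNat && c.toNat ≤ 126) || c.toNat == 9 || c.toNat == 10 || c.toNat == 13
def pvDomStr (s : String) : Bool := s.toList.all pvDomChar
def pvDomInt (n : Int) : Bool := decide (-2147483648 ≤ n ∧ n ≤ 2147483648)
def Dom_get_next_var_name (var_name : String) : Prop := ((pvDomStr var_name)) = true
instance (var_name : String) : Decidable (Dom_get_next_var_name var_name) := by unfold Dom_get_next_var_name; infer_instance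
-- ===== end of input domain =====

-- B replaces A's count-the-trailing-z-run + slice/replace passes by a single structural
-- right-to-left carry recursion (objective: alternative decomposition, same cost).

-- ===== PORT A =====

def get_next_char (c : Char) : Char :=
  let ascii := c.toNat + 1
  let ascii := if ascii > 122 then 97 else ascii
  Char.ofNat ascii

-- A's `count`: `for c in reversed(next_var): if c == 'z': count += 1 else: break`,
-- transliterated as recursion on the reversed character list (break = stop recursing).
def pvCountZ : List Char → Nat
  | [] => 0
  | c :: rest => if c = 'z' then pvCountZ rest + 1 else 0

def get_next_var_name (var_name : String) : String :=
  if var_name = "w" then "y" else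
  let s := var_name.toList
  -- next_var[-1] == 'z'  (Pre_ guarantees s ≠ [], so pyGetD's default is never used)
  if PySem.List.pyGetD s (-1) ' ' = 'z' then
    let count := pvCountZ s.reverse
    if count = s.length then
      String.ofList (PySem.Chars.replace s "z".toList "a".toList ++ "a".toList)
    else
      let base := PySem.List.slice s none (some (-(count : Int) - 1)) ++
        [get_next_char (PySem.List.pyGetD s (-(count : Int) - 1) ' ')]
      -- `for i in range(count): next_var += 'a'`
      String.ofList ((PySem.List.pyRange 0 (count : Int)).foldl
        (fun acc _ => acc ++ "a".toList) base)
  else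
    String.ofList (PySem.List.slice s none (some (-1)) ++
      [Char.ofNat ((PySem.List.pyGetD s (-1) ' ').toNat + 1)])

-- ===== PORT B =====

def wrap_succ (c : Char) : Char :=
  let n := c.toNat + 1
  Char.ofNat (if n > 122 then 97 else n)

-- Source B's `_carry_rev`: structural recursion on the reversed character list;
-- `none` = overflow (all chars were 'z').
def carry_rev : List Char → Option (List Char)
  | [] => none
  | c :: rest =>
    if c = 'z' then
      match carry_rev rest with
      | none => none
      | some r => some ('a' :: r)
    else
      some (wrap_succ c :: rest)

def get_next_var_name_alt (var_name : String) : String :=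
  if var_name = "w" then "y" else
  let chars := var_name.toList
  if PySem.List.pyGetD chars (-1) ' ' ≠ 'z' then
    String.ofList (PySem.List.slice chars none (some (-1)) ++
      [Char.ofNat ((PySem.List.pyGetD chars (-1) ' ').toNat + 1)])
  else
    match carry_rev chars.reverse with
    | none => String.ofList (PySem.List.pyRepeat "a".toList ((chars.length : Int) + 1))
    | some r => String.ofList r.reverse

-- ===== PRECONDITION & SPEC =====

-- Pre_ excludes only the empty string, on which both Pythons raise IndexError (chars[-1]).
def Pre_get_next_var_name (var_name : String) : Prop := var_name ≠ ""
instance (var_name : String) : Decidable (Pre_get_next_var_name var_name) := by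
  unfold Pre_get_next_var_name; infer_instance

def pvWitness_get_next_var_name : String := "ab"

def Spec_get_next_var_name (var_name : String) (out : String) : Prop :=
  out = get_next_var_name_alt var_name
instance (var_name : String) (out : String) : Decidable (Spec_get_next_var_name var_name out) := by
  unfold Spec_get_next_var_name; infer_instance

-- ===== CLAIM (what is proved, stated in full; the proofs are below) =====
def Claim_equal_get_next_var_name : Prop :=
  ∀ (var_name : String), Dom_get_next_var_name var_name →
    Pre_get_next_var_name var_name →
    Spec_get_next_var_name var_name (get_next_var_name var_name)

-- ===== LEMMAS AND PROOFS =====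

lemma pvCountZ_le (r : List Char) : pvCountZ r ≤ r.length := by
  induction r with
  | nil => simp [pvCountZ]
  | cons c rest ih =>
    simp only [pvCountZ, List.length_cons]
    split <;> omega

lemma all_z_of_count_eq (r : List Char) (h : pvCountZ r = r.length) :
    r = List.replicate r.length 'z' := by
  induction r with
  | nil => simp
  | cons c rest ih =>
    simp only [pvCountZ, List.length_cons] at h
    by_cases hc : c = 'z'
    · rw [if_pos hc] at h
      have h2 := ih (by omega)
      simp [List.replicate_succ, hc, ← h2]
    · rw [if_neg hc] at h
      have := pvCountZ_le rest
      omega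

lemma carry_rev_none (r : List Char) (h : pvCountZ r = r.length) :
    carry_rev r = none := by
  induction r with
  | nil => simp [carry_rev]
  | cons c rest ih =>
    simp only [pvCountZ, List.length_cons] at h
    by_cases hc : c = 'z'
    · rw [if_pos hc] at h
      simp [carry_rev, hc, ih (by omega)]
    · rw [if_neg hc] at h
      have := pvCountZ_le rest
      omega

lemma carry_struct (r : List Char) (h : pvCountZ r < r.length) :
    ∃ c rest, c ≠ 'z' ∧
      r = List.replicate (pvCountZ r) 'z' ++ c :: rest ∧
      carry_rev r = some (List.replicate (pvCountZ r) 'a' ++ wrap_succ c :: rest) := by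
  induction r with
  | nil => simp at h
  | cons c rest ih =>
    by_cases hc : c = 'z'
    · have hcount : pvCountZ (c :: rest) = pvCountZ rest + 1 := by simp [pvCountZ, hc]
      have hlt : pvCountZ rest < rest.length := by
        simp only [hcount, List.length_cons] at h; omega
      obtain ⟨c', rest', hc', hdec, hcar⟩ := ih hlt
      refine ⟨c', rest', hc', ?_, ?_⟩
      · rw [hcount, List.replicate_succ, hc, List.cons_append, ← hdec]
      · rw [hcount, List.replicate_succ]
        simp [carry_rev, hc, hcar]
    · have hcount : pvCountZ (c :: rest) = 0 := by simp [pvCountZ, hc]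
      exact ⟨c, rest, hc, by simp [hcount], by simp [carry_rev, hc, hcount]⟩

lemma replace_go_all_z (n : Nat) (acc : List Char) :
    PySem.Chars.replace.go "z".toList "a".toList n (List.replicate n 'z') acc =
      acc.reverse ++ List.replicate n 'a' := by
  induction n generalizing acc with
  | zero => rw [PySem.Chars.replace.go]; simp
  | succ n ih =>
    rw [List.replicate_succ, PySem.Chars.replace.go]
    rw [if_pos (by simp [List.isPrefixOf] :
      "z".toList.isPrefixOf ('z' :: List.replicate n 'z') = true)]
    rw [show ("z".toList.length) = 1 from rfl]
    simp only [List.drop_one, List.tail_cons]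
    rw [ih]
    simp [List.replicate_succ]

lemma replace_all_z (n : Nat) :
    PySem.Chars.replace (List.replicate n 'z') "z".toList "a".toList =
      List.replicate n 'a' := by
  rw [PySem.Chars.replace]
  rw [if_neg (by simp [List.isEmpty])]
  simpa using replace_go_all_z n []

lemma foldl_append_a (l : List Int) (base : List Char) :
    l.foldl (fun acc _ => acc ++ "a".toList) base = base ++ List.replicate l.length 'a' := by
  induction l generalizing base with
  | nil => simp
  | cons x xs ih =>
    simp only [List.foldl_cons, List.length_cons, ih]
    simp [List.replicate_succ, List.append_assoc]

lemma wrap_succ_eq_get_next_char (c : Char) : wrap_succ c = get_next_char c := rfl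

-- ===== VERDICT (by name: the statement is the Claim_ definition above) =====
theorem get_next_var_name_spec : Claim_equal_get_next_var_name := by
  intro var_name _hdom hpre
  unfold Spec_get_next_var_name get_next_var_name get_next_var_name_alt
  by_cases hw : var_name = "w"
  · simp [hw]
  rw [if_neg hw, if_neg hw]
  have hs : var_name.toList ≠ [] := by
    intro hn
    exact (Pre_get_next_var_name.eq_def var_name ▸ hpre)
      (String.toList_inj.mp (by simpa using hn))
  set s := var_name.toList with hsdef
  by_cases hz : PySem.List.pyGetD s (-1) ' ' = 'z'
  · -- last character is 'z'
    have hbz : ¬ (PySem.List.pyGetD s (-1) ' ' ≠ 'z') := by simpa using hz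
    rw [if_pos hz, if_neg hbz]
    have hle := pvCountZ_le s.reverse
    by_cases hall : pvCountZ s.reverse = s.length
    · -- the whole string is 'z's
      rw [if_pos hall]
      have hrev : s.reverse = List.replicate s.reverse.length 'z' :=
        all_z_of_count_eq s.reverse (by simpa using hall)
      have hsz : s = List.replicate s.length 'z' := by
        have h2 := congrArg List.reverse hrev
        simpa using h2
      simp only [carry_rev_none s.reverse (by simpa using hall)]
      rw [show ("a".toList) = ['a'] from rfl, PySem.List.pyRepeat_singleton]
      have htn : (((s.length : Int)) + 1).toNat = s.length + 1 := by omega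
      rw [htn]
      apply congrArg String.ofList
      calc PySem.Chars.replace s "z".toList "a".toList ++ "a".toList
          = List.replicate s.length 'a' ++ ['a'] := by
            rw [hsz, replace_all_z]; simp
        _ = List.replicate (s.length + 1) 'a' := by
            rw [← List.replicate_succ']
    · -- proper trailing run of 'z' of length k < length
      rw [if_neg hall]
      have hlt : pvCountZ s.reverse < s.reverse.length := by
        rw [List.length_reverse] at hle ⊢; omega
      obtain ⟨c, rest, hcz, hdec, hcar⟩ := carry_struct s.reverse hlt
      simp only [hcar]
      set k := pvCountZ s.reverse with hk
      have hsdecomp : s = rest.reverse ++ c :: List.replicate k 'z' := by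
        have h2 := congrArg List.reverse hdec
        simpa [List.reverse_append] using h2
      have hlen : s.length = rest.length + (k + 1) := by
        rw [hsdecomp]
        simp only [List.length_append, List.length_reverse, List.length_cons,
          List.length_replicate]
      have hidx : (-(k : Int) - 1) = -(((k + 1 : Nat)) : Int) := by push_cast; ring
      rw [hidx, PySem.List.slice_to_neg_natCast s (k+1) (by omega),
          PySem.List.pyGetD_neg_natCast s (k+1) ' ' (by omega) (by omega)]
      have hi : s.length - (k + 1) = rest.reverse.length := by
        simp only [List.length_reverse]; omega
      have htake : s.take (s.length - (k + 1)) = rest.reverse := by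
        rw [hi, hsdecomp, List.take_left]
      have hget : s[s.length - (k + 1)]'(by omega) = c := by
        simp only [hi]
        simp only [hsdecomp]
        rw [List.getElem_append_right (by omega)]
        simp
      rw [htake, hget]
      simp only [foldl_append_a, PySem.List.length_pyRange_one]
      have hk2 : ((k : Int) - 0).toNat = k := by omega
      rw [hk2]
      apply congrArg String.ofList
      rw [List.reverse_append, List.reverse_replicate, List.reverse_cons,
          wrap_succ_eq_get_next_char]
  · -- last character is not 'z': both take the same plain-successor branch
    rw [if_neg hz, if_pos (by simpa using hz)]
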